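-- pv_equiv track=rewrite | github.com/Dhruvsingh1605/Python_CodingInterviewQuestions | Raising_Exception.py | Exception_hai
-- ===== SOURCE A (Python) =====
-- def Exception_hai(num):
--     sum = 0
--     for i in range(len(num)):
--         if num[i] == 1:
--             raise Exception(f" {1} found in the list")
--         else:
--             sum += i
--     return sum
-- ===== SOURCE B (Python) =====
-- def Exception_hai(num):
--     if 1 in num:
--         raise Exception(f" {1} found in the list")
--     n = len(num)
--     return n * (n - 1) // 2
-- ===== Notes on version B (the rewrite author's own statement) =====
-- stated objective: simpler
-- what changed: Replaces the index-accumulating loop with a membership test plus the closed-form sum n*(n-1)//2 of indices 0..n-1.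
import Mathlib
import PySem

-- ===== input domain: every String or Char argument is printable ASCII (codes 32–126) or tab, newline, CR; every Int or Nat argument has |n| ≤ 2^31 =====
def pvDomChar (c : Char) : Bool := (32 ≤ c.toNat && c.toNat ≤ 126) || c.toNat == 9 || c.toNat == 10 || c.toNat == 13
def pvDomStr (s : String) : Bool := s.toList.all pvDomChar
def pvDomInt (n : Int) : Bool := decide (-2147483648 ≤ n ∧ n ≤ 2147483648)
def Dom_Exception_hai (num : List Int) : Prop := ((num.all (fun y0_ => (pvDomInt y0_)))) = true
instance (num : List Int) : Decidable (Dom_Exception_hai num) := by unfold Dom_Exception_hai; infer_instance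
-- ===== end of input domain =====

-- B replaces A's index-accumulating loop with a membership test plus the closed-form n*(n-1)//2 (objective: simpler).


-- ===== PORT A =====
-- loop over i in range(len(num)), accumulating sum; Python raises on num[i] == 1 (excluded by Pre_, port returns 0 there)
def Exception_hai_go (num : List Int) (i : Nat) (sum : Int) : Int :=
  if h : i < num.length then
    if num[i] = 1 then 0
    else Exception_hai_go num (i + 1) (sum + (i : Int))
  else sum
termination_by num.length - i

def Exception_hai (num : List Int) : Int :=
  Exception_hai_go num 0 0

-- ===== PORT B =====
def Exception_hai_alt (num : List Int) : Int :=
  if num.contains 1 then 0   -- Python raises here (excluded by Pre_)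
  else PySem.Int.floordiv ((num.length : Int) * ((num.length : Int) - 1)) 2

-- ===== PRECONDITION & SPEC =====
-- Pre_ excludes lists containing 1, on which Python A (and B) raise an Exception.
def Pre_Exception_hai (num : List Int) : Prop := (1 : Int) ∉ num
instance (num : List Int) : Decidable (Pre_Exception_hai num) := by unfold Pre_Exception_hai; infer_instance
def pvWitness_Exception_hai : List Int := [3, 0, -2, 5]

def Spec_Exception_hai (num : List Int) (out : Int) : Prop := out = Exception_hai_alt num
instance (num : List Int) (out : Int) : Decidable (Spec_Exception_hai num out) := by unfold Spec_Exception_hai; infer_instance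

-- ===== CLAIM (what is proved, stated in full; the proofs are below) =====
def Claim_equal_Exception_hai : Prop := ∀ (num : List Int), Dom_Exception_hai num → Pre_Exception_hai num → Spec_Exception_hai num (Exception_hai num)

-- ===== LEMMAS AND PROOFS =====
theorem Exception_hai_go_eq (num : List Int) (h1 : (1 : Int) ∉ num) :
    ∀ i sum, i ≤ num.length →
      Exception_hai_go num i sum * 2 =
        sum * 2 + ((num.length : Int) * ((num.length : Int) - 1) - (i : Int) * ((i : Int) - 1)) := by
  intro i sum hi
  induction hn : num.length - i generalizing i sum with
  | zero =>
    have : i = num.length := by omega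
    subst this
    rw [Exception_hai_go]
    simp
  | succ k ih =>
    have hlt : i < num.length := by omega
    rw [Exception_hai_go]
    rw [dif_pos hlt]
    have hne : num[i] ≠ 1 := fun h => h1 (h ▸ List.getElem_mem hlt)
    rw [if_neg hne]
    rw [ih (i + 1) (sum + (i : Int)) (by omega) (by omega)]
    push_cast
    ring

theorem floordiv_two (a : Int) : PySem.Int.floordiv (a * 2) 2 = a := by
  simp [PySem.Int.floordiv]
  try omega

-- ===== VERDICT =====
theorem Exception_hai_spec : Claim_equal_Exception_hai := by
  intro num _ hpre
  unfold Spec_Exception_hai Exception_hai Exception_hai_alt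
  have hc : num.contains 1 = false := by
    simp [List.contains_eq_mem]
    try exact hpre
  rw [hc]
  simp only [Bool.false_eq_true, if_false]
  have h := Exception_hai_go_eq num hpre 0 0 (Nat.zero_le _)
  simp at h
  rw [← h, floordiv_two]
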